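-- pv_equiv track=rewrite | github.com/AdamPaslawski/advent-of-code | day9/brute_force.py | build_space_map
-- ===== SOURCE A (Python) =====
-- def build_space_map(example_as_int_array):
--     space_array = []
--
--     offset = 0
--
--     for i in range(0,len(example_as_int_array)):
--
--         if i % 2 == 0:
--             # space is taken here
--             offset += example_as_int_array[i]
--         else:
--             # This is open space
--             space_index_start = offset
--             space_index_end = offset + example_as_int_array[i]
--             if space_index_start != space_index_end:
--                 space_array.append( [space_index_start, space_index_end] )
--             offset += example_as_int_array[i]
--
--     return space_array
-- ===== SOURCE B (Python) =====
-- def build_space_map(example_as_int_array):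
--     # Phase 1: prefix-sum table; prefix[i] = sum of the first i entries.
--     prefix = [0]
--     for x in example_as_int_array:
--         prefix.append(prefix[-1] + x)
--     # Phase 2: visit only the odd positions (the free-space entries).
--     space_array = []
--     for i in range(1, len(example_as_int_array), 2):
--         start = prefix[i]
--         end = prefix[i] + example_as_int_array[i]
--         if start != end:
--             space_array.append([start, end])
--     return space_array
-- ===== Notes on version B (the rewrite author's own statement) =====
-- stated objective: alternative
-- what changed: Replaces the single incremental-offset pass over every index with a two-phase shape: first build a prefix-sum table, then iterate only the odd indices (step-2 range) reading interval bounds from the table.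
import Mathlib
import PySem

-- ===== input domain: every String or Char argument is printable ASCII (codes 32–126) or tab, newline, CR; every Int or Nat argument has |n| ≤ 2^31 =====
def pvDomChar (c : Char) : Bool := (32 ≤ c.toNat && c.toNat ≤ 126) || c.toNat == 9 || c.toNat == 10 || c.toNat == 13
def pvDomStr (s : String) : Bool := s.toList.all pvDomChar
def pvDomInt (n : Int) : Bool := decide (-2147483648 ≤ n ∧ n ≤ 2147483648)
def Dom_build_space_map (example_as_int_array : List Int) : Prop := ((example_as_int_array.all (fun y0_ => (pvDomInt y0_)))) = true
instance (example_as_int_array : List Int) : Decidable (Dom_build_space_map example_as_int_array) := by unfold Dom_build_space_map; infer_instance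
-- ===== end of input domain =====

-- B replaces A's single incremental-offset pass with a two-phase shape (prefix-sum table, then a step-2 loop
-- over the odd indices); same O(n) cost, alternative decomposition.


-- ===== PORT A =====
-- literal transliteration: one pass over range(0, len), keeping (offset, space_array) as the loop state
def build_space_map (example_as_int_array : List Int) : List (List Int) :=
  ((PySem.List.pyRange 0 (PySem.List.len example_as_int_array) 1).foldl
    (fun (st : Int × List (List Int)) i =>
      if i % 2 == 0 then
        (st.1 + PySem.List.pyGetD example_as_int_array i 0, st.2)
      else
        let space_index_start := st.1
        let space_index_end := st.1 + PySem.List.pyGetD example_as_int_array i 0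
        (st.1 + PySem.List.pyGetD example_as_int_array i 0,
         if space_index_start ≠ space_index_end then
           st.2 ++ [[space_index_start, space_index_end]]
         else st.2))
    ((0 : Int), ([] : List (List Int)))).2

-- ===== PORT B =====
-- phase 1: prefix-sum table (prefix[-1] read via pyGet?); phase 2: step-2 loop over the odd indices
def build_space_map_alt (example_as_int_array : List Int) : List (List Int) :=
  let pfx := example_as_int_array.foldl
    (fun acc x => acc ++ [(PySem.List.pyGet? acc (-1)).getD 0 + x]) [(0 : Int)]
  (PySem.List.pyRange 1 (PySem.List.len example_as_int_array) 2).foldl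
    (fun acc i =>
      let start := PySem.List.pyGetD pfx i 0
      let stop := PySem.List.pyGetD pfx i 0 + PySem.List.pyGetD example_as_int_array i 0
      if start ≠ stop then acc ++ [[start, stop]] else acc) []

-- ===== PRECONDITION & SPEC =====
def Spec_build_space_map (example_as_int_array : List Int) (out : List (List Int)) : Prop := out = build_space_map_alt example_as_int_array
instance (example_as_int_array : List Int) (out : List (List Int)) : Decidable (Spec_build_space_map example_as_int_array out) := by unfold Spec_build_space_map; infer_instance

-- ===== CLAIM (what is proved, stated in full; the proofs are below) =====
def Claim_equal_build_space_map : Prop := ∀ (example_as_int_array : List Int), Dom_build_space_map example_as_int_array → Spec_build_space_map example_as_int_array (build_space_map example_as_int_array)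

-- ===== LEMMAS AND PROOFS =====

-- B's prefix fold is List.scanl (+)
theorem pfx_fold_eq_scanl (xs : List Int) : ∀ (acc : List Int) (s : Int),
    xs.foldl (fun acc x => acc ++ [(PySem.List.pyGet? acc (-1)).getD 0 + x]) (acc ++ [s])
      = acc ++ List.scanl (· + ·) s xs := by
  induction xs with
  | nil => intro acc s; simp
  | cons x t ih =>
    intro acc s
    simp only [List.foldl_cons, List.scanl_cons, PySem.List.pyGet?_neg_one_append_singleton,
      Option.getD_some]
    have := ih (acc ++ [s]) (s + x)
    simpa using this

-- reading the scanl table at position m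
theorem scanl_getD (xs : List Int) : ∀ (s : Int) (m : Nat), m ≤ xs.length →
    (List.scanl (· + ·) s xs).getD m 0 = s + (xs.take m).sum := by
  induction xs with
  | nil =>
    intro s m hm
    have h0 : m = 0 := by simpa using hm
    subst h0
    simp
  | cons x t ih =>
    intro s m hm
    cases m with
    | zero => simp
    | succ m =>
      simp only [List.scanl_cons, List.getD_cons_succ, List.take_succ_cons, List.sum_cons]
      rw [ih (s + x) m (by simpa using hm)]
      ring

-- step-2 range: appending an even index does not extend it
theorem range2_even (m : Nat) (hm : m % 2 = 0) :
    PySem.List.pyRange 1 ((m : Int) + 1) 2 = PySem.List.pyRange 1 (m : Int) 2 := by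
  rw [PySem.List.pyRange_of_pos _ _ (by norm_num), PySem.List.pyRange_of_pos _ _ (by norm_num)]
  congr 1
  rcases Nat.eq_zero_or_pos m with h0 | h0
  · subst h0; norm_num
  · have h1 : (1 : Int) < (m : Int) + 1 := by exact_mod_cast Nat.lt_add_of_pos_left h0 |>.trans_le (by omega)
    have h2 : (1 : Int) < (m : Int) := by omega
    rw [if_pos h1, if_pos h2]
    congr 1
    omega

-- step-2 range: appending an odd index extends it by exactly that index
theorem range2_odd (m : Nat) (hm : m % 2 = 1) :
    PySem.List.pyRange 1 ((m : Int) + 1) 2 = PySem.List.pyRange 1 (m : Int) 2 ++ [(m : Int)] := by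
  rw [PySem.List.pyRange_of_pos _ _ (by norm_num), PySem.List.pyRange_of_pos _ _ (by norm_num)]
  rcases Nat.eq_zero_or_pos m with h0 | h0
  · omega
  rcases Nat.lt_or_ge m 2 with h2 | h2
  · have : m = 1 := by omega
    subst this; simp
  · have ha : (1 : Int) < (m : Int) + 1 := by omega
    have hb : (1 : Int) < (m : Int) := by omega
    rw [if_pos ha, if_pos hb]
    have hcnt : (((m : Int) + 1 - 1 + 2 - 1) / 2).toNat = (((m : Int) - 1 + 2 - 1) / 2).toNat + 1 := by
      omega
    rw [hcnt, List.range_succ, List.map_append]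
    congr 1
    simp only [List.map_cons, List.map_nil]
    congr 1
    omega

-- empty ranges
theorem range2_zero : PySem.List.pyRange 1 (0 : Int) 2 = [] := by
  rw [PySem.List.pyRange_of_pos _ _ (by norm_num)]
  norm_num

-- main invariant: A's fold up to index m equals (prefix sum up to m, B's step-2 fold up to m)
theorem main_inv (xs : List Int) (m : Nat) (hm : m ≤ xs.length) :
    (PySem.List.pyRange 0 (m : Int) 1).foldl
      (fun (st : Int × List (List Int)) i =>
        if i % 2 == 0 then
          (st.1 + PySem.List.pyGetD xs i 0, st.2)
        else
          let space_index_start := st.1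
          let space_index_end := st.1 + PySem.List.pyGetD xs i 0
          (st.1 + PySem.List.pyGetD xs i 0,
           if space_index_start ≠ space_index_end then
             st.2 ++ [[space_index_start, space_index_end]]
           else st.2))
      ((0 : Int), ([] : List (List Int)))
    = ((xs.take m).sum,
       (PySem.List.pyRange 1 (m : Int) 2).foldl
         (fun acc i =>
           let start := PySem.List.pyGetD (List.scanl (· + ·) 0 xs) i 0
           let stop := PySem.List.pyGetD (List.scanl (· + ·) 0 xs) i 0 + PySem.List.pyGetD xs i 0
           if start ≠ stop then acc ++ [[start, stop]] else acc) []) := by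
  induction m with
  | zero =>
    simp [range2_zero, PySem.List.pyRange_one_eq_nil]
  | succ m ih =>
    have hm' : m ≤ xs.length := by omega
    have hlt : m < xs.length := by omega
    have hr1 : PySem.List.pyRange 0 ((m : Int) + 1) 1
        = PySem.List.pyRange 0 (m : Int) 1 ++ [(m : Int)] := by
      exact PySem.List.pyRange_one_succ_right (by positivity)
    have hxm : PySem.List.pyGetD xs ((m : Int)) 0 = xs[m] := by
      rw [PySem.List.pyGetD_natCast]; exact List.getD_eq_getElem xs 0 hlt
    have htake : (xs.take (m + 1)).sum = (xs.take m).sum + xs[m] := by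
      rw [List.take_succ, List.getElem?_eq_getElem hlt, List.sum_append]
      simp
    have hpfx : PySem.List.pyGetD (List.scanl (· + ·) 0 xs) ((m : Int)) 0 = (xs.take m).sum := by
      rw [PySem.List.pyGetD_natCast, scanl_getD xs 0 m hm']
      ring
    push_cast
    rw [hr1, List.foldl_append, ih hm']
    simp only [List.foldl_cons, List.foldl_nil]
    rcases Nat.mod_two_eq_zero_or_one m with hpar | hpar
    · have hbe : (((m : Int)) % 2 == 0) = true := by
        simp only [beq_iff_eq]; omega
      rw [range2_even m hpar]
      simp only [hbe, if_true, hxm, htake]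
    · have hbe : (((m : Int)) % 2 == 0) = false := by
        simp only [beq_eq_false_iff_ne, ne_eq]; omega
      rw [range2_odd m hpar]
      simp only [hbe, List.foldl_append, List.foldl_cons, List.foldl_nil, Bool.false_eq_true,
        if_false, htake, hxm, hpfx]

-- ===== VERDICT (by name: the statement is the Claim_ definition above) =====
theorem build_space_map_spec : Claim_equal_build_space_map := by
  intro xs _
  unfold Spec_build_space_map build_space_map build_space_map_alt
  have hpfx : xs.foldl (fun acc x => acc ++ [(PySem.List.pyGet? acc (-1)).getD 0 + x]) [(0 : Int)]
      = List.scanl (· + ·) 0 xs := by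
    simpa using pfx_fold_eq_scanl xs [] 0
  simp only [hpfx, PySem.List.len]
  rw [main_inv xs xs.length le_rfl]
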